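-- pv_equiv track=rewrite | github.com/nickhealthy/python-algorithm | 20_10_03/[programmers]_체육복.py | solution1
-- ===== SOURCE A (Python) =====
-- n = 5
--
-- lost = [1,4]
--
-- reserve = [3]
--
-- def solution1(n, lost, reserve):
--     count = 0
--     for i in lost:
--         for j in reserve:
--             if i+1 == j or i-1 == j:
--                 count += 1
--     count = n - len(lost) + count
--     return count
-- ===== SOURCE B (Python) =====
-- def _runs(xs):
--     # run-length encode a sorted list: [(value, multiplicity)...]
--     out = []
--     i = 0
--     while i < len(xs):
--         j = i + 1
--         while j < len(xs) and xs[j] == xs[i]: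
--             j += 1
--         out.append((xs[i], j - i))
--         i = j
--     return out
--
--
-- def solution1(n, lost, reserve):
--     L = _runs(sorted(lost))
--     R = _runs(sorted(reserve))
--     # merge the two run lists into one strictly increasing sequence of
--     # (value, lost-multiplicity, reserve-multiplicity)
--     merged = []
--     i = j = 0
--     while i < len(L) and j < len(R):
--         v, a = L[i]
--         w, b = R[j]
--         if v < w:
--             merged.append((v, a, 0)); i += 1
--         elif w < v:
--             merged.append((w, 0, b)); j += 1
--         else:
--             merged.append((v, a, b)); i += 1; j += 1
--     merged += [(v, a, 0) for v, a in L[i:]]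
--     merged += [(w, 0, b) for w, b in R[j:]]
--     # consecutive entries with values differing by 1 contribute cross products
--     adj = 0
--     for k in range(1, len(merged)):
--         u, a, b = merged[k - 1]
--         u2, a2, b2 = merged[k]
--         if u2 == u + 1:
--             adj += a * b2 + b * a2
--     return n - len(lost) + adj
-- ===== Notes on version B (the rewrite author's own statement) =====
-- stated objective: faster
-- what changed: Replaces the nested lost x reserve scan by sorting both lists, run-length encoding them, merging the two run lists into one strictly increasing (value, lost-mult, reserve-mult) sequence, and scanning consecutive entries once, adding cross products where values differ by 1.
import Mathlib
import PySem

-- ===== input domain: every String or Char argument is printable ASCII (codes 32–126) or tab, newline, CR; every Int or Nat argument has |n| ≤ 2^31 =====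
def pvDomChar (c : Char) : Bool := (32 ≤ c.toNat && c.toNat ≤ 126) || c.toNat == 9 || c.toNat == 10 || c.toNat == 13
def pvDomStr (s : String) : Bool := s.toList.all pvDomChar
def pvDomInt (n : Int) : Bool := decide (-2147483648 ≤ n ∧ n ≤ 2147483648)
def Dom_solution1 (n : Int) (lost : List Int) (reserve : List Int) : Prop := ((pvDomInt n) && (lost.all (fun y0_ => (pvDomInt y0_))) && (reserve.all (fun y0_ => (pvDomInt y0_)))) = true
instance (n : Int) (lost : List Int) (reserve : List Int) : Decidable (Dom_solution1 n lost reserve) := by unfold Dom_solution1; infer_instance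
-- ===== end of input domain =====

-- B replaces A's nested lost×reserve scan by sorting both lists, run-length encoding them, merging the runs into one strictly increasing sequence and scanning consecutive entries once (asymptotically faster).


-- ===== PORT A =====
def solution1 (n : Int) (lost : List Int) (reserve : List Int) : Int :=
  let count : Int := lost.foldl (fun c i =>
    reserve.foldl (fun c j => if i + 1 == j || i - 1 == j then c + 1 else c) c) 0
  n - lost.length + count

-- ===== PORT B =====
-- _runs: run-length encode a (sorted) list; the Python inner while = takeWhile/dropWhile
def pvRuns : List Int → List (Int × Int)
  | [] => []
  | x :: t =>
      (x, 1 + ((t.takeWhile (fun y => y == x)).length : Int)) ::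
        pvRuns (t.dropWhile (fun y => y == x))
termination_by xs => xs.length
decreasing_by
  simp only [List.length_cons]
  exact Nat.lt_succ_of_le (List.length_dropWhile_le _ _)

-- the merge while-loop over the two run lists
def pvMerge : List (Int × Int) → List (Int × Int) → List (Int × Int × Int)
  | [], R => R.map (fun p => (p.1, 0, p.2))
  | L, [] => L.map (fun p => (p.1, p.2, 0))
  | (v, a) :: L, (w, b) :: R =>
      if v < w then (v, a, 0) :: pvMerge L ((w, b) :: R)
      else if w < v then (w, 0, b) :: pvMerge ((v, a) :: L) R
      else (v, a, b) :: pvMerge L R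
termination_by L R => L.length + R.length

-- the final for-loop over consecutive merged entries
def pvScan : List (Int × Int × Int) → Int
  | [] => 0
  | [_] => 0
  | (u, a, b) :: (u2, a2, b2) :: rest =>
      (if u2 == u + 1 then a * b2 + b * a2 else 0) + pvScan ((u2, a2, b2) :: rest)

def solution1_alt (n : Int) (lost : List Int) (reserve : List Int) : Int :=
  let L := pvRuns (PySem.List.sorted lost (fun x => x) false)
  let R := pvRuns (PySem.List.sorted reserve (fun x => x) false)
  n - lost.length + pvScan (pvMerge L R)

-- ===== PRECONDITION & SPEC =====
def Spec_solution1 (n : Int) (lost : List Int) (reserve : List Int) (out : Int) : Prop := out = solution1_alt n lost reserve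
instance (n : Int) (lost : List Int) (reserve : List Int) (out : Int) : Decidable (Spec_solution1 n lost reserve out) := by unfold Spec_solution1; infer_instance

-- ===== CLAIM (what is proved, stated in full; the proofs are below) =====
def Claim_equal_solution1 : Prop := ∀ (n : Int) (lost : List Int) (reserve : List Int), Dom_solution1 n lost reserve → Spec_solution1 n lost reserve (solution1 n lost reserve)

-- ===== LEMMAS AND PROOFS =====

-- multiplicity of value w in a run list
def pvCnt (R : List (Int × Int)) (w : Int) : Int :=
  (R.map (fun p => if p.1 = w then p.2 else 0)).sum

-- the target value of the merge-scan, stated over the two run lists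
def pvS (L R : List (Int × Int)) : Int :=
  (L.map (fun p => p.2 * (pvCnt R (p.1 - 1) + pvCnt R (p.1 + 1)))).sum

def pvHa : List (Int × Int × Int) → Int → Int
  | (u, a, _) :: _, x => if u = x then a else 0
  | [], _ => 0

def pvHb : List (Int × Int × Int) → Int → Int
  | (u, _, b) :: _, x => if u = x then b else 0
  | [], _ => 0

lemma inner_count (i : Int) (reserve : List Int) (c : Int) :
    reserve.foldl (fun c j => if i + 1 == j || i - 1 == j then c + 1 else c) c
      = c + ((reserve.count (i - 1) : Int) + (reserve.count (i + 1) : Int)) := by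
  induction reserve generalizing c with
  | nil => simp
  | cons j t ih =>
    simp only [List.foldl_cons, List.count_cons, ih]
    by_cases h1 : i + 1 = j <;> by_cases h2 : i - 1 = j <;>
      simp [h1, h2, beq_iff_eq] <;> omega

lemma outer_sum (lost reserve : List Int) (c : Int) :
    lost.foldl (fun c i =>
        reserve.foldl (fun c j => if i + 1 == j || i - 1 == j then c + 1 else c) c) c
      = c + (lost.map (fun i =>
          ((reserve.count (i - 1) : Int) + (reserve.count (i + 1) : Int)))).sum := by
  induction lost generalizing c with
  | nil => simp
  | cons i t ih =>
    rw [List.foldl_cons, inner_count, ih, List.map_cons, List.sum_cons]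
    ring

lemma cnt_nil (x : Int) : pvCnt [] x = 0 := rfl

lemma cnt_cons (v a : Int) (R : List (Int × Int)) (x : Int) :
    pvCnt ((v, a) :: R) x = (if v = x then a else 0) + pvCnt R x := by
  simp [pvCnt]

lemma cnt_zero (R : List (Int × Int)) (x : Int) (h : ∀ p ∈ R, p.1 ≠ x) :
    pvCnt R x = 0 := by
  induction R with
  | nil => rfl
  | cons p R ih =>
    rw [show p = (p.1, p.2) from rfl, cnt_cons]
    rw [if_neg (h p (List.mem_cons_self)), ih (fun q hq => h q (List.mem_cons_of_mem _ hq))]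
    ring

-- head-vs-rest facts of a strictly increasing run list
lemma pw_cons (w b : Int) (R : List (Int × Int))
    (h : (((w, b) :: R).map Prod.fst).Pairwise (· < ·)) :
    (∀ p ∈ R, w < p.1) ∧ (R.map Prod.fst).Pairwise (· < ·) := by
  rw [List.map_cons, List.pairwise_cons] at h
  exact ⟨fun p hp => h.1 p.1 (List.mem_map_of_mem hp), h.2⟩

lemma scan_cons (u a b : Int) (M : List (Int × Int × Int)) :
    pvScan ((u, a, b) :: M) = a * pvHb M (u + 1) + b * pvHa M (u + 1) + pvScan M := by
  cases M with
  | nil => simp [pvScan, pvHa, pvHb]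
  | cons q M =>
    obtain ⟨u2, a2, b2⟩ := q
    simp only [pvScan, pvHa, pvHb, beq_iff_eq]
    split_ifs <;> ring

lemma scan_mapR (R : List (Int × Int)) :
    pvScan (R.map (fun p => (p.1, (0 : Int), p.2))) = 0 := by
  induction R with
  | nil => rfl
  | cons p R ih =>
    cases R with
    | nil => rfl
    | cons q R' =>
      obtain ⟨w, b⟩ := p; obtain ⟨w2, b2⟩ := q
      simp only [List.map_cons, pvScan, beq_iff_eq] at ih ⊢
      split_ifs <;> simpa using ih

lemma scan_mapL (L : List (Int × Int)) :
    pvScan (L.map (fun p => (p.1, p.2, (0 : Int)))) = 0 := by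
  induction L with
  | nil => rfl
  | cons p L ih =>
    cases L with
    | nil => rfl
    | cons q L' =>
      obtain ⟨v, a⟩ := p; obtain ⟨v2, a2⟩ := q
      simp only [List.map_cons, pvScan, beq_iff_eq] at ih ⊢
      split_ifs <;> simpa using ih

-- heads of the merge at value v+1, when every run value on both sides exceeds v
lemma heads_merge (v : Int) (L R : List (Int × Int))
    (hL : ∀ p ∈ L, v < p.1) (hR : ∀ p ∈ R, v < p.1)
    (sL : (L.map Prod.fst).Pairwise (· < ·)) (sR : (R.map Prod.fst).Pairwise (· < ·)) :
    pvHb (pvMerge L R) (v + 1) = pvCnt R (v + 1) ∧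
    pvHa (pvMerge L R) (v + 1) = pvCnt L (v + 1) := by
  have tail0 : ∀ (h : Int) (T : List (Int × Int)), v < h →
      (∀ p ∈ T, h < p.1) → pvCnt T (v + 1) = 0 := by
    intro h T hh hT
    exact cnt_zero _ _ (fun p hp => by have := hT p hp; omega)
  cases L with
  | nil =>
    cases R with
    | nil => simp [pvMerge, pvHa, pvHb, cnt_nil]
    | cons q R' =>
      obtain ⟨w, b⟩ := q
      have hw : v < w := hR _ (List.mem_cons_self)
      have h0 : pvCnt R' (v + 1) = 0 := tail0 w R' hw (pw_cons w b R' sR).1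
      constructor
      · simp [pvMerge, pvHb, cnt_cons, h0]
      · simp [pvMerge, pvHa, cnt_nil]
  | cons p L' =>
    obtain ⟨u, a⟩ := p
    have hu : v < u := hL _ (List.mem_cons_self)
    have hL0 : pvCnt L' (v + 1) = 0 := tail0 u L' hu (pw_cons u a L' sL).1
    cases R with
    | nil =>
      constructor
      · simp [pvMerge, pvHb, cnt_nil]
      · simp [pvMerge, pvHa, cnt_cons, hL0]
    | cons q R' =>
      obtain ⟨w, b⟩ := q
      have hw : v < w := hR _ (List.mem_cons_self)
      have hR0 : pvCnt R' (v + 1) = 0 := tail0 w R' hw (pw_cons w b R' sR).1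
      by_cases h1 : u < w
      · have hRfull : pvCnt ((w, b) :: R') (v + 1) = 0 := by
          rw [cnt_cons, if_neg (show w ≠ v + 1 by omega), hR0]; ring
        constructor
        · simp [pvMerge, h1, pvHb, hRfull]
        · simp [pvMerge, h1, pvHa, cnt_cons, hL0]
      · by_cases h2 : w < u
        · have hLfull : pvCnt ((u, a) :: L') (v + 1) = 0 := by
            rw [cnt_cons, if_neg (show u ≠ v + 1 by omega), hL0]; ring
          constructor
          · simp [pvMerge, h1, h2, pvHb, cnt_cons, hR0]
          · simp [pvMerge, h1, h2, pvHa, hLfull]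
        · have huw : u = w := by omega
          subst huw
          constructor
          · simp [pvMerge, pvHb, cnt_cons, hR0]
          · simp [pvMerge, pvHa, cnt_cons, hL0]

lemma pvS_cons_left (v a : Int) (L R : List (Int × Int)) :
    pvS ((v, a) :: L) R = a * (pvCnt R (v - 1) + pvCnt R (v + 1)) + pvS L R := by
  simp [pvS]

lemma pvS_nil_right (L : List (Int × Int)) : pvS L [] = 0 := by
  induction L with
  | nil => rfl
  | cons p L ih =>
    rw [show p = (p.1, p.2) from rfl, pvS_cons_left, cnt_nil, cnt_nil, ih]
    ring

lemma pvS_cons_right (L : List (Int × Int)) (w b : Int) (R' : List (Int × Int)) :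
    pvS L ((w, b) :: R') = b * pvCnt L (w + 1) + b * pvCnt L (w - 1) + pvS L R' := by
  induction L with
  | nil => simp [pvS, cnt_nil]
  | cons p L ih =>
    obtain ⟨v, a⟩ := p
    rw [pvS_cons_left, pvS_cons_left, ih]
    simp only [cnt_cons]
    split_ifs
    all_goals try (exfalso; omega)
    all_goals ring

lemma merge_scan : ∀ (L R : List (Int × Int)),
    (L.map Prod.fst).Pairwise (· < ·) → (R.map Prod.fst).Pairwise (· < ·) →
    pvScan (pvMerge L R) = pvS L R := by
  intro L R
  induction L, R using pvMerge.induct with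
  | case1 R =>
    intro _ _
    simp [pvMerge, scan_mapR, pvS]
  | case2 L h =>
    intro _ _
    cases L with
    | nil => simp [pvMerge, pvS, pvScan]
    | cons p L' =>
      rw [show pvMerge (p :: L') [] = (p :: L').map (fun p => (p.1, p.2, (0 : Int))) by
            simp [pvMerge]]
      rw [scan_mapL, pvS_nil_right]
  | case3 v a L' w b R' h1 ih =>
    intro sL sR
    have hL' := pw_cons v a L' sL
    have hR : ∀ p ∈ (w, b) :: R', v < p.1 := by
      intro p hp
      rcases List.mem_cons.mp hp with h | h
      · subst h; exact h1
      · have := (pw_cons w b R' sR).1 p h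
        omega
    have hd := heads_merge v L' ((w, b) :: R') hL'.1 hR hL'.2 sR
    rw [show pvMerge ((v, a) :: L') ((w, b) :: R') = (v, a, 0) :: pvMerge L' ((w, b) :: R') by
          simp [pvMerge, h1]]
    rw [scan_cons, hd.1, hd.2, ih hL'.2 sR]
    rw [pvS_cons_left, cnt_zero ((w, b) :: R') (v - 1) (fun p hp => by have := hR p hp; omega)]
    ring
  | case4 v a L' w b R' h1 h2 ih =>
    intro sL sR
    have hR' := pw_cons w b R' sR
    have hL : ∀ p ∈ (v, a) :: L', w < p.1 := by
      intro p hp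
      rcases List.mem_cons.mp hp with h | h
      · subst h; exact h2
      · have := (pw_cons v a L' sL).1 p h
        omega
    have hd := heads_merge w ((v, a) :: L') R' hL hR'.1 sL hR'.2
    rw [show pvMerge ((v, a) :: L') ((w, b) :: R') = (w, 0, b) :: pvMerge ((v, a) :: L') R' by
          simp [pvMerge, h1, h2]]
    rw [scan_cons, hd.1, hd.2, ih sL hR'.2]
    rw [pvS_cons_right, cnt_zero ((v, a) :: L') (w - 1) (fun p hp => by have := hL p hp; omega)]
    ring
  | case5 v a L' w b R' h1 h2 ih =>
    intro sL sR
    have hvw : v = w := by omega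
    subst hvw
    have hL' := pw_cons v a L' sL
    have hR' := pw_cons v b R' sR
    have hd := heads_merge v L' R' hL'.1 hR'.1 hL'.2 hR'.2
    rw [show pvMerge ((v, a) :: L') ((v, b) :: R') = (v, a, b) :: pvMerge L' R' by
          simp [pvMerge]]
    rw [scan_cons, hd.1, hd.2, ih hL'.2 hR'.2]
    rw [pvS_cons_left, pvS_cons_right]
    simp only [cnt_cons]
    rw [cnt_zero L' (v - 1) (fun p hp => by have := hL'.1 p hp; omega),
        cnt_zero R' (v - 1) (fun p hp => by have := hR'.1 p hp; omega),
        if_neg (show v ≠ v - 1 by omega), if_neg (show v ≠ v + 1 by omega)]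
    ring

lemma sum_runs : ∀ (xs : List Int) (f : Int → Int),
    (xs.map f).sum = ((pvRuns xs).map (fun p => p.2 * f p.1)).sum := by
  intro xs
  induction xs using pvRuns.induct with
  | case1 => intro f; simp [pvRuns]
  | case2 x t ih =>
    intro f
    have hsplit : t = t.takeWhile (fun y => y == x) ++ t.dropWhile (fun y => y == x) :=
      (List.takeWhile_append_dropWhile).symm
    have htake : ∀ y ∈ t.takeWhile (fun y => y == x), y = x := by
      intro y hy
      have := List.mem_takeWhile_imp hy
      simpa using this
    have hsum : ((t.takeWhile (fun y => y == x)).map f).sum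
        = ((t.takeWhile (fun y => y == x)).length : Int) * f x := by
      generalize t.takeWhile (fun y => y == x) = ys at htake
      induction ys with
      | nil => simp
      | cons z zs ihz =>
        have hz : z = x := htake z (List.mem_cons_self)
        have hzs : ∀ y ∈ zs, y = x := fun y hy => htake y (List.mem_cons_of_mem _ hy)
        simp only [List.map_cons, List.sum_cons, List.length_cons, ihz hzs, hz]
        push_cast
        ring
    rw [pvRuns]
    simp only [List.map_cons, List.sum_cons]
    conv_lhs => rw [hsplit]
    rw [List.map_append, List.sum_append, hsum, ih f]
    ring

lemma runs_mem : ∀ (ys : List Int), ∀ p ∈ pvRuns ys, p.1 ∈ ys := by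
  intro ys
  induction ys using pvRuns.induct with
  | case1 => intro p hp; simp [pvRuns] at hp
  | case2 x t ih =>
    intro p hp
    rw [pvRuns] at hp
    rcases List.mem_cons.mp hp with h | h
    · subst h; exact List.mem_cons_self
    · have := ih p h
      exact List.mem_cons_of_mem _ ((List.dropWhile_sublist _).subset this)

lemma drop_gt (x : Int) : ∀ (t : List Int), t.Pairwise (· ≤ ·) → (∀ y ∈ t, x ≤ y) →
    ∀ y ∈ t.dropWhile (fun y => y == x), x < y := by
  intro t
  induction t with
  | nil => intro _ _ y hy; simp at hy
  | cons z t' ih =>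
    intro hs hge y hy
    by_cases hz : z = x
    · rw [List.dropWhile_cons_of_pos (by simp [hz])] at hy
      exact ih (List.pairwise_cons.mp hs).2
        (fun y hy' => hge y (List.mem_cons_of_mem _ hy')) y hy
    · rw [List.dropWhile_cons_of_neg (by simp [hz])] at hy
      rcases List.mem_cons.mp hy with h | h
      · subst h
        have := hge y (List.mem_cons_self)
        omega
      · have h1 := (List.pairwise_cons.mp hs).1 y h
        have h2 := hge z (List.mem_cons_self)
        omega

lemma runs_pairwise : ∀ (ys : List Int), ys.Pairwise (· ≤ ·) →
    ((pvRuns ys).map Prod.fst).Pairwise (· < ·) := by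
  intro ys
  induction ys using pvRuns.induct with
  | case1 => intro _; simp [pvRuns]
  | case2 x t ih =>
    intro hs
    rw [pvRuns]
    simp only [List.map_cons]
    refine List.pairwise_cons.mpr ⟨?_, ?_⟩
    · intro z hz
      obtain ⟨p, hp, hpz⟩ := List.mem_map.mp hz
      subst hpz
      have hmem := runs_mem _ p hp
      exact drop_gt x t (List.pairwise_cons.mp hs).2
        (fun y hy => (List.pairwise_cons.mp hs).1 y hy) p.1 hmem
    · exact ih ((List.pairwise_cons.mp hs).2.sublist (List.dropWhile_sublist _))

lemma indicator_sum (w : Int) (ys : List Int) :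
    (ys.map (fun i => if i = w then (1 : Int) else 0)).sum = (ys.count w : Int) := by
  induction ys with
    | nil => simp
    | cons z zs ihz =>
      rw [List.map_cons, List.sum_cons, ihz, List.count_cons]
      by_cases hz : z = w
      · simp [hz]
        ring
      · simp [hz]

lemma cnt_runs (ys : List Int) (w : Int) :
    pvCnt (pvRuns ys) w = (ys.count w : Int) := by
  have h := sum_runs ys (fun i => if i = w then 1 else 0)
  have hr : ((pvRuns ys).map (fun p => p.2 * (if p.1 = w then (1 : Int) else 0))).sum
      = pvCnt (pvRuns ys) w := by
    unfold pvCnt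
    congr 1
    apply List.map_congr_left
    intro p _
    split_ifs <;> ring
  rw [← indicator_sum w ys, h, hr]

-- ===== VERDICT (by name: the statement is the Claim_ definition above) =====
theorem solution1_spec : Claim_equal_solution1 := by
  intro n lost reserve _
  unfold Spec_solution1
  have hA : solution1 n lost reserve
      = n - lost.length + (lost.map (fun i =>
          ((reserve.count (i - 1) : Int) + (reserve.count (i + 1) : Int)))).sum := by
    unfold solution1
    rw [outer_sum]
    ring
  have hB : solution1_alt n lost reserve
      = n - lost.length + (lost.map (fun i =>
          ((reserve.count (i - 1) : Int) + (reserve.count (i + 1) : Int)))).sum := by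
    rw [show solution1_alt n lost reserve
        = n - (lost.length : Int) + pvScan (pvMerge
            (pvRuns (PySem.List.sorted lost (fun x => x) false))
            (pvRuns (PySem.List.sorted reserve (fun x => x) false))) from rfl]
    have hpl : (PySem.List.sorted lost (fun x => x) false).Perm lost :=
      PySem.List.sorted_perm _ _ _
    have hpr : (PySem.List.sorted reserve (fun x => x) false).Perm reserve :=
      PySem.List.sorted_perm _ _ _
    have spl : (PySem.List.sorted lost (fun x => x) false).Pairwise (· ≤ ·) := by
      have := PySem.List.sorted_pairwise lost (fun x => x) (κ := Int)
      simpa using this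
    have spr : (PySem.List.sorted reserve (fun x => x) false).Pairwise (· ≤ ·) := by
      have := PySem.List.sorted_pairwise reserve (fun x => x) (κ := Int)
      simpa using this
    rw [merge_scan _ _ (runs_pairwise _ spl) (runs_pairwise _ spr)]
    unfold pvS
    have hcnt : ∀ x : Int, pvCnt (pvRuns (PySem.List.sorted reserve (fun x => x) false)) x
        = (reserve.count x : Int) := by
      intro x
      rw [cnt_runs, hpr.count_eq]
    simp only [hcnt]
    have hsr : ((pvRuns (PySem.List.sorted lost (fun x => x) false)).map (fun p =>
          p.2 * ((reserve.count (p.1 - 1) : Int) + (reserve.count (p.1 + 1) : Int)))).sum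
        = ((PySem.List.sorted lost (fun x => x) false).map (fun v =>
          ((reserve.count (v - 1) : Int) + (reserve.count (v + 1) : Int)))).sum :=
      (sum_runs _ (fun v => ((reserve.count (v - 1) : Int) + (reserve.count (v + 1) : Int)))).symm
    rw [hsr]
    have hps : ((PySem.List.sorted lost (fun x => x) false).map (fun v =>
          ((reserve.count (v - 1) : Int) + (reserve.count (v + 1) : Int)))).sum
        = (lost.map (fun i =>
          ((reserve.count (i - 1) : Int) + (reserve.count (i + 1) : Int)))).sum :=
      (hpl.map _).sum_eq
    rw [hps]
  rw [hA, hB]
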